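-- pv_equiv track=rewrite | github.com/FedericaRobertazzi/Robertazzi_et_al_code_BG_MetaLearning_DecisionMakingTasks_NeuralNetworks_2022 | code /BG_MetaLearning_NoGoTask/utility.py | motor_output
-- ===== SOURCE A (Python) =====
-- def motor_output(PMC):
--     PMC = [j for sub in PMC for j in sub]
--     action_selected= PMC[0]
--     imax = 0
--     for i in range(len(PMC)):
--         if(PMC[i]>action_selected):
--             action_selected=PMC[i]
--             imax = i
--     return action_selected,imax
-- ===== SOURCE B (Python) =====
-- def motor_output(PMC):
--     flat = [j for sub in PMC for j in sub]
--     best = max(flat)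
--     return best, flat.index(best)
-- ===== Notes on version B (the rewrite author's own statement) =====
-- stated objective: simpler
-- what changed: Replaces the hand-written index loop that tracks a running (best, imax) pair with two built-in passes: best = max(flat) and flat.index(best), which give the same value and first index of the maximum.
import Mathlib
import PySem

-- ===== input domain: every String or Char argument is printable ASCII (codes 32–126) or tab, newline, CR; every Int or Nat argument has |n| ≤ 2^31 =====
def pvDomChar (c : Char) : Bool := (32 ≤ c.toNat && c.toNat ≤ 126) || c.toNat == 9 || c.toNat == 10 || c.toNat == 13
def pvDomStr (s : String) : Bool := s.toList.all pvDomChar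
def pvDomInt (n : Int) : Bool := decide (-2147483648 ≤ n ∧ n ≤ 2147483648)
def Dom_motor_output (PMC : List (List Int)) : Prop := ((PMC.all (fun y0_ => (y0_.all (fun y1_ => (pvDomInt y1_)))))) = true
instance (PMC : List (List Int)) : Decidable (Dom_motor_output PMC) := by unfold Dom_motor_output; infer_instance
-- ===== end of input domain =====

-- B replaces A's hand-written running (best, imax) index loop by two built-in passes
-- (max of the flattened list, then first index of that maximum); objective: simpler.


-- ===== PORT A =====
-- PMC = [j for sub in PMC for j in sub]; action_selected = PMC[0]; imax = 0;
-- for i in range(len(PMC)): if PMC[i] > action_selected: action_selected = PMC[i]; imax = i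
def motor_output (PMC : List (List Int)) : Int × Int :=
  let P := PMC.flatMap id
  match PySem.List.pyGet? P 0 with
  | none => (0, 0)  -- Python raises IndexError here (empty flattened list); excluded by Pre_
  | some a0 =>
    (PySem.List.pyRange 0 (PySem.List.len P)).foldl
      (fun s i =>
        if PySem.List.pyGetD P i 0 > s.1 then (PySem.List.pyGetD P i 0, i) else s)
      (a0, 0)

-- ===== PORT B =====
-- flat = [j for sub in PMC for j in sub]; best = max(flat); return best, flat.index(best)
def motor_output_alt (PMC : List (List Int)) : Int × Int :=
  let flat := PMC.flatMap id
  match PySem.List.max? flat (fun x => x) with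
  | none => (0, 0)  -- Python raises ValueError here (max of empty list); excluded by Pre_
  | some best => (best, ((PySem.List.index? flat best).getD 0 : Nat))

-- ===== PRECONDITION & SPEC =====
-- A raises IndexError (and B ValueError) when the flattened list is empty; those inputs are excluded.
def Pre_motor_output (PMC : List (List Int)) : Prop := PMC.flatMap id ≠ []
instance (PMC : List (List Int)) : Decidable (Pre_motor_output PMC) := by unfold Pre_motor_output; infer_instance
def pvWitness_motor_output : List (List Int) := [[1, 2], [3]]
def Spec_motor_output (PMC : List (List Int)) (out : Int × Int) : Prop := out = motor_output_alt PMC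
instance (PMC : List (List Int)) (out : Int × Int) : Decidable (Spec_motor_output PMC out) := by unfold Spec_motor_output; infer_instance

-- ===== CLAIM (what is proved, stated in full; the proofs are below) =====
def Claim_equal_motor_output : Prop := ∀ (PMC : List (List Int)), Dom_motor_output PMC → Pre_motor_output PMC → Spec_motor_output PMC (motor_output PMC)

-- ===== LEMMAS AND PROOFS =====

-- A's loop over the flattened list P, as a function of P alone.
def loopA (P : List Int) : Int × Int :=
  (PySem.List.pyRange 0 (PySem.List.len P)).foldl
    (fun s i =>
      if PySem.List.pyGetD P i 0 > s.1 then (PySem.List.pyGetD P i 0, i) else s)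
    (PySem.List.pyGetD P 0 0, 0)

-- B's result, as a function of the flattened list alone.
def outB (P : List Int) : Int × Int :=
  match PySem.List.max? P (fun x => x) with
  | none => (0, 0)
  | some best => (best, ((PySem.List.index? P best).getD 0 : Nat))

lemma pyGetD_append_lt (Q R : List Int) (i : Int) (h0 : 0 ≤ i) (h : i < (Q.length : Int)) :
    PySem.List.pyGetD (Q ++ R) i 0 = PySem.List.pyGetD Q i 0 := by
  rw [PySem.List.pyGetD_eq_getElem _ _ h0 (by simpa using lt_of_lt_of_le h (by exact_mod_cast Nat.le_add_right Q.length R.length)),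
      PySem.List.pyGetD_eq_getElem _ _ h0 h]
  exact List.getElem_append_left (by omega)

lemma max?_append_singleton (Q : List Int) (x m : Int)
    (h : PySem.List.max? Q (fun y => y) = some m) :
    PySem.List.max? (Q ++ [x]) (fun y => y) = if m < x then some x else some m := by
  simp only [PySem.List.max?] at h ⊢
  rw [List.foldl_append, h]
  rfl

lemma loopA_eq_outB (P : List Int) (hP : P ≠ []) : loopA P = outB P := by
  induction P using List.reverseRecOn with
  | nil => exact absurd rfl hP
  | append_singleton Q x IH =>
    rcases eq_or_ne Q [] with rfl | hQ
    · have h1 : PySem.List.pyRange 0 1 = [0] := by decide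
      simp [loopA, outB, h1, PySem.List.max?,
        PySem.List.pyGetD, PySem.List.pyGet?, PySem.List.pyIdx?]
    · have hlen : (0 : Int) ≤ (Q.length : Int) := by positivity
      -- peel the last loop iteration
      have hrange : PySem.List.pyRange 0 (PySem.List.len (Q ++ [x])) =
          PySem.List.pyRange 0 (PySem.List.len Q) ++ [(Q.length : Int)] := by
        simp only [PySem.List.len_eq, List.length_append, List.length_cons, List.length_nil]
        rw [show ((Q.length + (0 + 1) : Nat) : Int) = (Q.length : Int) + 1 by push_cast; ring]
        exact PySem.List.pyRange_one_succ_right hlen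
      have hinit : PySem.List.pyGetD (Q ++ [x]) 0 0 = PySem.List.pyGetD Q 0 0 := by
        refine pyGetD_append_lt Q [x] 0 le_rfl ?_
        have : Q.length ≠ 0 := fun h => hQ (List.eq_nil_of_length_eq_zero h)
        omega
      have hcongr :
          (PySem.List.pyRange 0 (PySem.List.len Q)).foldl
            (fun s i => if PySem.List.pyGetD (Q ++ [x]) i 0 > s.1
              then (PySem.List.pyGetD (Q ++ [x]) i 0, i) else s)
            (PySem.List.pyGetD Q 0 0, 0) = loopA Q := by
        unfold loopA
        refine PySem.List.foldl_congr_mem _ _ _ _ ?_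
        intro acc i hi
        have hmem := PySem.List.mem_pyRange_one.mp hi
        rw [PySem.List.len_eq] at hmem
        rw [pyGetD_append_lt Q [x] i hmem.1 hmem.2]
      have hlast : PySem.List.pyGetD (Q ++ [x]) (Q.length : Int) 0 = x := by
        rw [PySem.List.pyGetD_eq_getElem _ _ hlen (by simp)]
        simp
      have hA : loopA (Q ++ [x]) =
          (if (loopA Q).1 < x then (x, (Q.length : Int)) else loopA Q) := by
        conv_lhs => unfold loopA
        rw [hrange, List.foldl_append, hinit, hcongr]
        simp only [List.foldl_cons, List.foldl_nil, hlast, gt_iff_lt]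
      obtain ⟨MQ, hMQ⟩ : ∃ m, PySem.List.max? Q (fun y => y) = some m := by
        cases h : PySem.List.max? Q (fun y => y) with
        | none => exact absurd ((PySem.List.max?_eq_none_iff Q _).mp h) hQ
        | some m => exact ⟨m, rfl⟩
      have hBQ : outB Q = (MQ, (((PySem.List.index? Q MQ).getD 0 : Nat) : Int)) := by
        simp only [outB, hMQ]
      rw [hA, IH hQ, hBQ]
      have hBapp : PySem.List.max? (Q ++ [x]) (fun y => y) =
          (if MQ < x then some x else some MQ) := max?_append_singleton Q x MQ hMQ
      by_cases hlt : MQ < x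
      · have hxnot : x ∉ Q := fun hx => absurd (PySem.List.max?_isMax hMQ x hx) (not_le.mpr hlt)
        simp only [outB, hBapp, if_pos hlt]
        rw [PySem.List.index?_append_singleton_self Q x hxnot]
        simp
      · have hmem : MQ ∈ Q := PySem.List.max?_mem hMQ
        simp only [outB, hBapp, if_neg hlt]
        rw [PySem.List.index?_append_of_mem [x] hmem]

-- ===== VERDICT (by name: the statement is the Claim_ definition above) =====
theorem motor_output_spec : Claim_equal_motor_output := by
  intro PMC _ hpre
  have h := loopA_eq_outB (PMC.flatMap id) hpre
  unfold Spec_motor_output motor_output motor_output_alt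
  unfold loopA outB at h
  cases hP : PMC.flatMap id with
  | nil => exact absurd hP hpre
  | cons p t =>
    rw [hP] at h
    rw [show PySem.List.pyGetD (p :: t) 0 0 = p from by
      simp [PySem.List.pyGetD, PySem.List.pyGet?, PySem.List.pyIdx?]] at h
    simpa [PySem.List.pyGet?, PySem.List.pyIdx?] using h
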